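-- pv_equiv track=rewrite | github.com/aleeds/Group-Theory | groups.py | ApplyPermutationAut
-- ===== SOURCE A (Python) =====
-- def InverseChar(a):
--     if (a.lower() == a):
--         return a.upper()
--     else:
--         return a.lower()
--
-- def ApplyPermutationAut(word, perms):
--     ret = ""
--     for c in word:
--         for (a, b) in perms:
--             if (a == c):
--                 ret += b
--             elif (a == InverseChar(c)):
--                 ret += InverseChar(b)
--     return ret
-- ===== SOURCE B (Python) =====
-- def InverseChar(a):
--     if (a.lower() == a):
--         return a.upper()
--     else:
--         return a.lower()
--
-- def ApplyPermutationAut(word, perms):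
--     # Build once: char -> concatenated contributions of all perms, in order.
--     contrib = {}
--     for (a, b) in perms:
--         contrib[a] = contrib.get(a, "") + b
--         ia = InverseChar(a)
--         if ia != a:
--             contrib[ia] = contrib.get(ia, "") + InverseChar(b)
--     return "".join([contrib.get(c, "") for c in word])
-- ===== Notes on version B (the rewrite author's own statement) =====
-- stated objective: faster
-- what changed: Instead of scanning all perms for every character of word, B builds a dict mapping each character (and its case-inverse) to its concatenated contribution once, then does a single dict lookup per character of word.
import Mathlib
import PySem

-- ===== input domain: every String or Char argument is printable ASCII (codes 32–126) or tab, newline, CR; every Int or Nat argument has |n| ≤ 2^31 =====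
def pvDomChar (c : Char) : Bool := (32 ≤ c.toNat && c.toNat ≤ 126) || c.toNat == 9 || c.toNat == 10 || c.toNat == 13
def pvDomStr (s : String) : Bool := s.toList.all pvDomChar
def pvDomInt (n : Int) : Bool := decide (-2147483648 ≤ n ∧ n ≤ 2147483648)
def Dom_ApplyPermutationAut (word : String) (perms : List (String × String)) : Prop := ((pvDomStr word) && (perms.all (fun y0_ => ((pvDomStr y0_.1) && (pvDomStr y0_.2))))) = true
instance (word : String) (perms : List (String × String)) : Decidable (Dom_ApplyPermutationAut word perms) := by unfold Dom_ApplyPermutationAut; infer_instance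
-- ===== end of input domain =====

-- B builds a dict char→concatenated contributions once from perms, then makes one pass over word
-- (O(|perms|+|word|) instead of A's O(|word|·|perms|)); return values agree everywhere.

-- ===== PORT A =====
-- InverseChar(a): Python str.lower/str.upper via PySem.Chars (exact on the ASCII domain).
def pvInvChars (s : List Char) : List Char :=
  if PySem.Chars.lower s = s then PySem.Chars.upper s else PySem.Chars.lower s

-- literal transliteration of A: for c in word: for (a,b) in perms: append b / InverseChar(b).
def ApplyPermutationAut (word : String) (perms : List (String × String)) : String :=
  String.ofList <|
    word.toList.foldl (fun ret c =>
      perms.foldl (fun ret ab =>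
        if ab.1.toList = [c] then ret ++ ab.2.toList
        else if ab.1.toList = pvInvChars [c] then ret ++ pvInvChars ab.2.toList
        else ret) ret) []

-- ===== PORT B =====
-- one step of B's dict-building loop: contrib[a] += b; if InverseChar(a) != a: contrib[ia] += InverseChar(b)
def pvPermStep (d : PySem.Dict (List Char) (List Char)) (ab : String × String) :
    PySem.Dict (List Char) (List Char) :=
  let d1 := d.insert ab.1.toList (d.getD ab.1.toList [] ++ ab.2.toList)
  let ia := pvInvChars ab.1.toList
  if ia ≠ ab.1.toList then d1.insert ia (d1.getD ia [] ++ pvInvChars ab.2.toList) else d1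

-- literal transliteration of B: build the dict once, then "".join(contrib.get(c, "") for c in word).
def ApplyPermutationAut_alt (word : String) (perms : List (String × String)) : String :=
  let contrib := perms.foldl pvPermStep PySem.Dict.empty
  String.ofList ((word.toList.map (fun c => contrib.getD [c] [])).flatten)

-- ===== PRECONDITION & SPEC =====
def Spec_ApplyPermutationAut (word : String) (perms : List (String × String)) (out : String) : Prop := out = ApplyPermutationAut_alt word perms
instance (word : String) (perms : List (String × String)) (out : String) : Decidable (Spec_ApplyPermutationAut word perms out) := by unfold Spec_ApplyPermutationAut; infer_instance

-- ===== CLAIM (what is proved, stated in full; the proofs are below) =====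
def Claim_equal_ApplyPermutationAut : Prop := ∀ (word : String) (perms : List (String × String)), Dom_ApplyPermutationAut word perms → Spec_ApplyPermutationAut word perms (ApplyPermutationAut word perms)

-- ===== LEMMAS AND PROOFS =====

-- what A's inner loop appends for character c and one pair (a, b)
def pieceA (c : Char) (ab : String × String) : List Char :=
  if ab.1.toList = [c] then ab.2.toList
  else if ab.1.toList = pvInvChars [c] then pvInvChars ab.2.toList
  else []

-- what one step of B's dict-building loop appends under key k
def pieceB (k : List Char) (ab : String × String) : List Char :=
  (if ab.1.toList = k then ab.2.toList else []) ++
  (if pvInvChars ab.1.toList = k ∧ pvInvChars ab.1.toList ≠ ab.1.toList then pvInvChars ab.2.toList else [])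

-- InverseChar on a one-character string, at the character level
def pvInvCh (c : Char) : Char :=
  if PySem.Chars.lowerChar c = c then PySem.Chars.upperChar c else PySem.Chars.lowerChar c

lemma pvInvChars_singleton (c : Char) : pvInvChars [c] = [pvInvCh c] := by
  unfold pvInvChars pvInvCh
  by_cases h : PySem.Chars.lowerChar c = c <;>
    simp [PySem.Chars.lower, PySem.Chars.upper, h]

lemma pvInvChars_length (s : List Char) : (pvInvChars s).length = s.length := by
  unfold pvInvChars
  split_ifs <;> simp [PySem.Chars.lower, PySem.Chars.upper]

set_option maxRecDepth 40000 in
lemma pvInvCh_invol (c : Char) (h : pvDomChar c = true) : pvInvCh (pvInvCh c) = c := by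
  have hlt : c.toNat < 127 := by
    simp only [pvDomChar, Bool.or_eq_true, Bool.and_eq_true, decide_eq_true_eq, beq_iff_eq] at h
    omega
  have key : ∀ n : Nat, n < 127 → pvInvCh (pvInvCh (Char.ofNat n)) = Char.ofNat n := by decide
  have := key c.toNat hlt
  rwa [Char.ofNat_toNat] at this

lemma step_getD (d : PySem.Dict (List Char) (List Char)) (ab : String × String) (k : List Char) :
    (pvPermStep d ab).getD k [] = d.getD k [] ++ pieceB k ab := by
  simp only [pvPermStep, pieceB]
  by_cases hia : pvInvChars ab.1.toList = ab.1.toList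
  · rw [if_neg (not_not_intro hia), PySem.Dict.getD_insert]
    by_cases hk : k = ab.1.toList
    · rw [if_pos hk, if_pos hk.symm, if_neg (fun h : pvInvChars ab.1.toList = k ∧ pvInvChars ab.1.toList ≠ ab.1.toList => h.2 hia), hk, List.append_nil]
    · rw [if_neg hk, if_neg (fun h : ab.1.toList = k => hk h.symm),
          if_neg (fun h : pvInvChars ab.1.toList = k ∧ pvInvChars ab.1.toList ≠ ab.1.toList => hk (hia.symm.trans h.1).symm),
          List.append_nil, List.append_nil]
  · rw [if_pos hia, PySem.Dict.getD_insert]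
    by_cases hk : k = pvInvChars ab.1.toList
    · rw [if_pos hk, PySem.Dict.getD_insert, if_neg hia]
      have hAk : ¬ ab.1.toList = k := fun h => hia (h.trans hk).symm
      rw [if_neg hAk, if_pos ⟨hk.symm, hia⟩, hk, List.nil_append]
    · rw [if_neg hk, PySem.Dict.getD_insert]
      by_cases hk2 : k = ab.1.toList
      · rw [if_pos hk2, if_pos hk2.symm, if_neg (fun h : pvInvChars ab.1.toList = k ∧ pvInvChars ab.1.toList ≠ ab.1.toList => hk h.1.symm), hk2,
            List.append_nil]
      · rw [if_neg hk2, if_neg (fun h : ab.1.toList = k => hk2 h.symm),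
            if_neg (fun h : pvInvChars ab.1.toList = k ∧ pvInvChars ab.1.toList ≠ ab.1.toList => hk h.1.symm), List.append_nil, List.append_nil]

lemma build_getD (perms : List (String × String)) (d : PySem.Dict (List Char) (List Char))
    (k : List Char) :
    (perms.foldl pvPermStep d).getD k [] = d.getD k [] ++ (perms.map (pieceB k)).flatten := by
  induction perms generalizing d with
  | nil => simp
  | cons ab rest ih =>
    simp only [List.foldl_cons, List.map_cons, List.flatten_cons]
    rw [ih, step_getD, List.append_assoc]

lemma innerA (c : Char) (perms : List (String × String)) (ret : List Char) :
    perms.foldl (fun ret ab =>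
        if ab.1.toList = [c] then ret ++ ab.2.toList
        else if ab.1.toList = pvInvChars [c] then ret ++ pvInvChars ab.2.toList
        else ret) ret
      = ret ++ (perms.map (pieceA c)).flatten := by
  induction perms generalizing ret with
  | nil => simp
  | cons ab rest ih =>
    simp only [List.foldl_cons, List.map_cons, List.flatten_cons]
    rw [ih]
    unfold pieceA
    split_ifs <;> simp

lemma outerA (cs : List Char) (perms : List (String × String)) (acc : List Char) :
    cs.foldl (fun ret c =>
        perms.foldl (fun ret ab =>
          if ab.1.toList = [c] then ret ++ ab.2.toList
          else if ab.1.toList = pvInvChars [c] then ret ++ pvInvChars ab.2.toList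
          else ret) ret) acc
      = acc ++ (cs.map (fun c => (perms.map (pieceA c)).flatten)).flatten := by
  induction cs generalizing acc with
  | nil => simp
  | cons c rest ih =>
    simp only [List.foldl_cons, List.map_cons, List.flatten_cons]
    rw [innerA, ih, List.append_assoc]

lemma pieceAB (c : Char) (hc : pvDomChar c = true) (ab : String × String)
    (ha : pvDomStr ab.1 = true) : pieceA c ab = pieceB [c] ab := by
  unfold pieceA pieceB
  by_cases h1 : ab.1.toList = [c]
  · rw [if_pos h1, if_pos h1]
    have : ¬ (pvInvChars ab.1.toList = [c] ∧ pvInvChars ab.1.toList ≠ ab.1.toList) := by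
      rw [h1]; rintro ⟨he, hne⟩; exact hne he
    simp [this]
  · rw [if_neg h1, if_neg h1, List.nil_append]
    by_cases h2 : ab.1.toList = pvInvChars [c]
    · rw [if_pos h2]
      have hiac : pvInvChars ab.1.toList = [c] := by
        rw [h2, pvInvChars_singleton, pvInvChars_singleton, pvInvCh_invol c hc]
      have hne : pvInvChars ab.1.toList ≠ ab.1.toList := by
        rw [hiac]; exact fun h => h1 h.symm
      rw [if_pos ⟨hiac, hne⟩]
    · rw [if_neg h2]
      rw [if_neg ?_]
      rintro ⟨he, hne⟩
      -- ab.1 is a single character x with pvInvCh x = c; involution gives ab.1 = pvInvChars [c]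
      have hlen : ab.1.toList.length = 1 := by
        have := pvInvChars_length ab.1.toList
        rw [he] at this; simpa using this.symm
      obtain ⟨x, hx⟩ := List.length_eq_one_iff.mp hlen
      have hxdom : pvDomChar x = true := by
        have := ha
        simp only [pvDomStr, List.all_eq_true, hx] at this
        exact this x (by simp)
      have hxc : pvInvCh x = c := by
        rw [hx, pvInvChars_singleton] at he
        simpa using he
      apply h2
      rw [hx, pvInvChars_singleton, ← hxc, pvInvCh_invol x hxdom]

lemma dom_parts (word : String) (perms : List (String × String))
    (h : Dom_ApplyPermutationAut word perms) :
    (∀ c ∈ word.toList, pvDomChar c = true) ∧ (∀ ab ∈ perms, pvDomStr ab.1 = true) := by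
  unfold Dom_ApplyPermutationAut at h
  simp only [Bool.and_eq_true, List.all_eq_true, pvDomStr] at h
  refine ⟨h.1, fun ab hab => ?_⟩
  simp only [pvDomStr, List.all_eq_true]
  exact (h.2 ab hab).1

-- ===== VERDICT (by name: the statement is the Claim_ definition above) =====
theorem ApplyPermutationAut_spec : Claim_equal_ApplyPermutationAut := by
  intro word perms hdom
  obtain ⟨hw, hp⟩ := dom_parts word perms hdom
  unfold Spec_ApplyPermutationAut ApplyPermutationAut ApplyPermutationAut_alt
  rw [outerA]
  congr 1
  rw [List.nil_append]
  congr 1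
  apply List.map_congr_left
  intro c hc
  rw [build_getD]
  have hempty : (PySem.Dict.empty : PySem.Dict (List Char) (List Char)).getD [c] [] = [] := rfl
  rw [hempty, List.nil_append]
  congr 1
  apply List.map_congr_left
  intro ab hab
  exact pieceAB c (hw c hc) ab (hp ab hab)
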